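-- pv_equiv track=rewrite | github.com/sethluby/msp-ansible-platform | scripts/yaml_indent_fix.py | fix_block_children_indentation
-- ===== SOURCE A (Python) =====
-- from typing import List, Tuple
--
-- def _indent(s: str, n: int) -> str:
--     return (" " * n) + s.strip() + "\n"
--
-- def fix_block_children_indentation(lines: List[str]) -> List[str]:
--     """Indent tasks under a block: by two spaces and their args by four.
--
--     Detect a line with 'block:' and push subsequent '- name:' one level deeper
--     until we hit the next de-dented section/task at or above the parent indent.
--     """
--     i = 0
--     out: List[str] = []
--     while i < len(lines):
--         line = lines[i]
--         out.append(line)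
--         i += 1
--         if line.strip() == "block:":
--             block_indent = len(line) - len(line.lstrip())
--             # Process subsequent lines
--             while i < len(lines):
--                 nxt = lines[i]
--                 nstrip = nxt.strip()
--                 nindent = len(nxt) - len(nxt.lstrip())
--                 # Stop if we dedent to block level or above and hit a new section/task
--                 if nindent < block_indent:
--                     break
--                 if nstrip.startswith("- name:") and nindent == block_indent:
--                     out.append(_indent(nstrip, block_indent + 2))
--                 elif nindent == block_indent and nstrip and not nstrip.endswith(":"):
--                     # Any content line directly under block should be deeper
--                     out.append(_indent(nstrip, block_indent + 2))
--                 elif nindent == block_indent + 2 and (nstrip and not nstrip.endswith(":")):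
--                     # module args one level deeper under task name
--                     out.append(_indent(nstrip, block_indent + 4))
--                 else:
--                     out.append(nxt)
--                 i += 1
--     return out
-- ===== SOURCE B (Python) =====
-- def _ind(line):
--     return len(line) - len(line.lstrip())
--
-- def _reindent(line, bi):
--     s = line.strip()
--     if s.startswith("- name:") and _ind(line) == bi:
--         return " " * (bi + 2) + s + "\n"
--     if _ind(line) == bi and s and not s.endswith(":"):
--         return " " * (bi + 2) + s + "\n"
--     if _ind(line) == bi + 2 and s and not s.endswith(":"):
--         return " " * (bi + 4) + s + "\n"
--     return line
--
-- def fix_block_children_indentation(lines):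
--     """Two staged passes: first build a segment table [(start, end, block_indent)]
--     of the regions governed by a 'block:' line, then assemble the output from
--     verbatim gap slices and a reindent map over each segment slice."""
--     n = len(lines)
--     # stage 1: segment table (no output is built here)
--     segs = []
--     i = 0
--     while i < n:
--         if lines[i].strip() == "block:":
--             bi = _ind(lines[i])
--             k = i + 1
--             while k < n and _ind(lines[k]) >= bi:
--                 k += 1
--             segs.append((i + 1, k, bi))
--             i = k
--         else:
--             i += 1
--     # stage 2: assemble from slices
--     out = []
--     prev = 0
--     for s, e, bi in segs:
--         out += lines[prev:s]
--         out += [_reindent(l, bi) for l in lines[s:e]]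
--         prev = e
--     out += lines[prev:]
--     return out
-- ===== Notes on version B (the rewrite author's own statement) =====
-- stated objective: alternative
-- what changed: Replaced A's nested shared-index while loops that build the output line by line with two staged passes: pass 1 computes a segment table [(start, end, block_indent)] of the block-governed regions (building no output), pass 2 assembles the result from verbatim gap slices and a reindent map over each segment slice.
import Mathlib
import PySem

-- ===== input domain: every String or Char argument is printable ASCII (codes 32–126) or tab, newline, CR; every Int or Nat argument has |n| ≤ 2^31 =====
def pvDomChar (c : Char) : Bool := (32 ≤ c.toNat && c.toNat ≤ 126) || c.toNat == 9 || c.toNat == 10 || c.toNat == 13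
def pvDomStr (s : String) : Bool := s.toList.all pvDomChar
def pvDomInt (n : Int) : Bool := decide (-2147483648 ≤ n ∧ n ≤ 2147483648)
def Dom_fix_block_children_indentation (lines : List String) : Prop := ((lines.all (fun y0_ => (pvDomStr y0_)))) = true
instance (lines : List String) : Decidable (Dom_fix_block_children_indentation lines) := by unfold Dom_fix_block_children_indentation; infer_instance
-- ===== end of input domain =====

-- B replaces A's nested per-line while loops by two staged passes (a segment table, then slice-and-map assembly); same return values, no speed claim.

-- ===== PORT A =====
-- _indent(s, n) = " "*n + s.strip() + "\n"
def pvIndentA (s : String) (n : Int) : String :=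
  String.ofList (List.replicate n.toNat ' ' ++ (PySem.Str.strip s).toList ++ ['\n'])

-- indentation width: len(line) - len(line.lstrip())
def pvIndentOf (line : String) : Int :=
  PySem.Str.len line - PySem.Str.len (PySem.Str.lstrip line)

-- A's two while loops sharing the index i: mode = none is the outer loop, mode = some bi the
-- inner loop; the inner 'break' re-enters the outer loop on the same line (same list, mode drops).
def aLoop (mode : Option Int) (ls : List String) : List String :=
  match mode, ls with
  | _, [] => []
  | none, l :: rest =>
      l :: (if PySem.Str.strip l = "block:" then aLoop (some (pvIndentOf l)) rest
            else aLoop none rest)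
  | some bi, l :: rest =>
      if pvIndentOf l < bi then aLoop none (l :: rest)
      else
        (if PySem.Str.startswith (PySem.Str.strip l) "- name:" = true ∧ pvIndentOf l = bi then
            pvIndentA (PySem.Str.strip l) (bi + 2)
         else if pvIndentOf l = bi ∧ PySem.Str.strip l ≠ "" ∧ ¬ (PySem.Str.endswith (PySem.Str.strip l) ":" = true) then
            pvIndentA (PySem.Str.strip l) (bi + 2)
         else if pvIndentOf l = bi + 2 ∧ (PySem.Str.strip l ≠ "" ∧ ¬ (PySem.Str.endswith (PySem.Str.strip l) ":" = true)) then
            pvIndentA (PySem.Str.strip l) (bi + 4)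
         else l) :: aLoop (some bi) rest
  termination_by (ls.length, match mode with | none => 0 | some _ => 1)

def fix_block_children_indentation (lines : List String) : List String :=
  aLoop none lines

-- ===== PORT B =====
-- B's _ind helper (len(line) - len(line.lstrip()))
def bInd (line : String) : Int :=
  PySem.Str.len line - PySem.Str.len (PySem.Str.lstrip line)

-- B's _reindent helper: the per-line transformation under a block of indent bi
def bReindent (line : String) (bi : Int) : String :=
  let s := PySem.Str.strip line
  if PySem.Str.startswith s "- name:" = true ∧ bInd line = bi then
    String.ofList (List.replicate (bi + 2).toNat ' ' ++ s.toList ++ ['\n'])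
  else if bInd line = bi ∧ s ≠ "" ∧ ¬ (PySem.Str.endswith s ":" = true) then
    String.ofList (List.replicate (bi + 2).toNat ' ' ++ s.toList ++ ['\n'])
  else if bInd line = bi + 2 ∧ s ≠ "" ∧ ¬ (PySem.Str.endswith s ":" = true) then
    String.ofList (List.replicate (bi + 4).toNat ' ' ++ s.toList ++ ['\n'])
  else line

-- stage 1, inner scan: 'while k < n and _ind(lines[k]) >= bi: k += 1' — first stop index from k
def bAdvance (lines : List String) (bi : Int) (k : Nat) : Nat :=
  if h : k < lines.length then
    if bi ≤ bInd lines[k] then bAdvance lines bi (k + 1) else k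
  else k
  termination_by lines.length - k
  decreasing_by omega

-- the scan only moves forward (cited by bSegs' decreasing_by)
theorem bAdvance_ge (lines : List String) (bi : Int) (k : Nat) : k ≤ bAdvance lines bi k := by
  rw [bAdvance]
  split
  · split
    · have := bAdvance_ge lines bi (k + 1); omega
    · omega
  · omega
  termination_by lines.length - k
  decreasing_by omega

-- stage 1, outer scan: the segment table [(start, end, block_indent)]
def bSegs (lines : List String) (i : Nat) : List (Nat × Nat × Int) :=
  if h : i < lines.length then
    if PySem.Str.strip lines[i] = "block:" then
      (i + 1, bAdvance lines (bInd lines[i]) (i + 1), bInd lines[i])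
        :: bSegs lines (bAdvance lines (bInd lines[i]) (i + 1))
    else bSegs lines (i + 1)
  else []
  termination_by lines.length - i
  decreasing_by
  · have := bAdvance_ge lines (bInd lines[i]) (i + 1); omega
  · omega

-- stage 2, one step of the assembly loop over the segment table; state = (out, prev)
def bEmitStep (lines : List String) (st : List String × Nat) (seg : Nat × Nat × Int) : List String × Nat :=
  match st, seg with
  | (out, prev), (s, e, bi) =>
      (out ++ PySem.List.slice lines (some (prev : Int)) (some (s : Int))
           ++ (PySem.List.slice lines (some (s : Int)) (some (e : Int))).map (fun l => bReindent l bi),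
       e)

def fix_block_children_indentation_alt (lines : List String) : List String :=
  let segs := bSegs lines 0
  let st := segs.foldl (bEmitStep lines) ([], 0)
  st.1 ++ PySem.List.slice lines (some (st.2 : Int)) none

-- ===== PRECONDITION & SPEC =====
def Spec_fix_block_children_indentation (lines : List String) (out : List String) : Prop := out = fix_block_children_indentation_alt lines
instance (lines : List String) (out : List String) : Decidable (Spec_fix_block_children_indentation lines out) := by unfold Spec_fix_block_children_indentation; infer_instance

-- ===== CLAIM =====
def Claim_equal_fix_block_children_indentation : Prop := ∀ (lines : List String), Dom_fix_block_children_indentation lines → Spec_fix_block_children_indentation lines (fix_block_children_indentation lines)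

-- ===== LEMMAS AND PROOFS =====

theorem dropWhile_idem (p : Char → Bool) (l : List Char) :
    (l.dropWhile p).dropWhile p = l.dropWhile p := by
  induction l with
  | nil => simp
  | cons a t ih => by_cases h : p a <;> simp [h, ih]

theorem dropWhile_prefix_of_dropWhile_eq (p : Char → Bool) (m t : List Char)
    (hm : m.dropWhile p = m) (ht : t <+: m) : t.dropWhile p = t := by
  cases t with
  | nil => simp
  | cons a u =>
    cases m with
    | nil => simp at ht
    | cons b v =>
      have hab : a = b := by
        rcases ht with ⟨w, hw⟩
        exact (List.cons.injEq a (u ++ w) b v ▸ hw) |>.1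
      subst hab
      by_cases h : p a
      · simp [h] at hm
        have hlen := congrArg List.length hm
        have hle := List.length_dropWhile_le p v
        simp at hlen
        omega
      · simp [h]

theorem strip_idem_chars (l : List Char) :
    PySem.Chars.strip (PySem.Chars.strip l) = PySem.Chars.strip l := by
  have hls : ∀ x : List Char, PySem.Chars.lstrip x = x.dropWhile PySem.Chars.isspace := fun _ => rfl
  have hl : (PySem.Chars.lstrip l).dropWhile PySem.Chars.isspace = PySem.Chars.lstrip l := by
    rw [hls]; exact dropWhile_idem _ _
  have hpref : PySem.Chars.rstrip (PySem.Chars.lstrip l) <+: PySem.Chars.lstrip l := by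
    simp only [PySem.Chars.rstrip]
    rw [← List.reverse_suffix]
    simpa using List.dropWhile_suffix (l := (PySem.Chars.lstrip l).reverse) (p := PySem.Chars.isspace)
  simp only [PySem.Chars.strip]
  rw [hls, dropWhile_prefix_of_dropWhile_eq _ _ _ hl hpref]
  simp only [PySem.Chars.rstrip, List.reverse_reverse, dropWhile_idem]

theorem strip_idem (s : String) :
    PySem.Str.strip (PySem.Str.strip s) = PySem.Str.strip s := by
  apply String.toList_inj.mp
  rw [PySem.Str.toList_strip, PySem.Str.toList_strip]
  exact strip_idem_chars _

-- B's _ind is the same expression as A's inline indent computation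
theorem bInd_eq (line : String) : bInd line = pvIndentOf line := rfl

-- A's inner-loop else expression for one line equals B's _reindent
theorem branch_eq (l : String) (bi : Int) :
    (if PySem.Str.startswith (PySem.Str.strip l) "- name:" = true ∧ pvIndentOf l = bi then
        pvIndentA (PySem.Str.strip l) (bi + 2)
     else if pvIndentOf l = bi ∧ PySem.Str.strip l ≠ "" ∧ ¬ (PySem.Str.endswith (PySem.Str.strip l) ":" = true) then
        pvIndentA (PySem.Str.strip l) (bi + 2)
     else if pvIndentOf l = bi + 2 ∧ (PySem.Str.strip l ≠ "" ∧ ¬ (PySem.Str.endswith (PySem.Str.strip l) ":" = true)) then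
        pvIndentA (PySem.Str.strip l) (bi + 4)
     else l) = bReindent l bi := by
  simp only [bReindent, pvIndentA, strip_idem, bInd_eq]
  rfl

-- A's inner loop, read from index j: it maps the transformation over the segment
-- lines[j : bAdvance j) and then breaks back into the outer loop at bAdvance j.
theorem inner_eq (lines : List String) (bi : Int) (j : Nat) :
    aLoop (some bi) (lines.drop j)
      = ((lines.drop j).take (bAdvance lines bi j - j)).map (fun l => bReindent l bi)
        ++ aLoop none (lines.drop (bAdvance lines bi j)) := by
  by_cases h : j < lines.length
  · have hdrop : lines.drop j = lines[j] :: lines.drop (j + 1) :=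
      (List.getElem_cons_drop h).symm
    rw [bAdvance, dif_pos h]
    by_cases hge : bi ≤ bInd lines[j]
    · rw [if_pos hge]
      have hk := bAdvance_ge lines bi (j + 1)
      have ih := inner_eq lines bi (j + 1)
      conv_lhs => rw [hdrop, aLoop]
      rw [if_neg (show ¬ pvIndentOf lines[j] < bi from by rw [← bInd_eq]; omega)]
      rw [branch_eq, ih]
      conv_rhs => rw [hdrop]
      rw [show bAdvance lines bi (j + 1) - j = (bAdvance lines bi (j + 1) - (j + 1)) + 1 from by omega]
      rw [List.take_succ_cons, List.map_cons, List.cons_append]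
    · rw [if_neg hge]
      conv_lhs => rw [hdrop, aLoop]
      rw [if_pos (show pvIndentOf lines[j] < bi from by rw [← bInd_eq]; omega)]
      rw [← hdrop]
      simp
  · have hnil : lines.drop j = [] := List.drop_eq_nil_of_le (by omega)
    rw [bAdvance, dif_neg h, hnil]
    simp [aLoop]
  termination_by lines.length - j
  decreasing_by omega

-- proof-only recursive form of B's stage-2 assembly loop
def emitFrom (lines : List String) (segs : List (Nat × Nat × Int)) (prev : Nat) : List String :=
  match segs with
  | [] => lines.drop prev
  | (s, e, bi) :: rest =>
      PySem.List.slice lines (some (prev : Int)) (some (s : Int))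
        ++ (PySem.List.slice lines (some (s : Int)) (some (e : Int))).map (fun l => bReindent l bi)
        ++ emitFrom lines rest e

theorem emit_foldl (lines : List String) (segs : List (Nat × Nat × Int)) :
    ∀ (out : List String) (prev : Nat),
      (segs.foldl (bEmitStep lines) (out, prev)).1
        ++ lines.drop (segs.foldl (bEmitStep lines) (out, prev)).2
      = out ++ emitFrom lines segs prev := by
  induction segs with
  | nil => intro out prev; simp [emitFrom]
  | cons seg rest ih =>
      intro out prev
      obtain ⟨s, e, bi⟩ := seg
      rw [List.foldl_cons]
      show ((rest.foldl (bEmitStep lines) (bEmitStep lines (out, prev) (s, e, bi))).1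
              ++ lines.drop (rest.foldl (bEmitStep lines) (bEmitStep lines (out, prev) (s, e, bi))).2 = _)
      rw [show bEmitStep lines (out, prev) (s, e, bi)
            = (out ++ PySem.List.slice lines (some (prev : Int)) (some (s : Int))
                   ++ (PySem.List.slice lines (some (s : Int)) (some (e : Int))).map (fun l => bReindent l bi), e) from rfl]
      rw [ih]
      simp [emitFrom]

-- every segment produced from index j starts at or after j + 1
theorem bSegs_start (lines : List String) (j : Nat) (s e : Nat) (bi : Int) (rest : List (Nat × Nat × Int))
    (h : bSegs lines j = (s, e, bi) :: rest) : j + 1 ≤ s := by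
  rw [bSegs] at h
  split at h
  · split at h
    · rw [List.cons.injEq] at h
      have := h.1
      simp only [Prod.mk.injEq] at this
      omega
    · have := bSegs_start lines (j + 1) s e bi rest h
      omega
  · exact absurd h (by simp)
  termination_by lines.length - j
  decreasing_by omega

-- skipping one non-segment line: emitFrom over the same table from one index earlier
theorem emitFrom_skip (lines : List String) (segs : List (Nat × Nat × Int)) (i : Nat)
    (hi : i < lines.length)
    (hs : ∀ s e bi rest, segs = (s, e, bi) :: rest → i + 1 ≤ s) :
    emitFrom lines segs i = lines[i] :: emitFrom lines segs (i + 1) := by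
  have hdrop : lines.drop i = lines[i] :: lines.drop (i + 1) :=
    (List.getElem_cons_drop hi).symm
  cases segs with
  | nil => simp only [emitFrom]; exact hdrop
  | cons seg rest =>
      obtain ⟨s, e, bi⟩ := seg
      have hle : i + 1 ≤ s := hs s e bi rest rfl
      have h1 : PySem.List.slice lines (some (i : Int)) (some (s : Int))
          = lines[i] :: PySem.List.slice lines (some ((i + 1 : Nat) : Int)) (some (s : Int)) := by
        rw [PySem.List.slice_natCast, PySem.List.slice_natCast, hdrop,
          show s - i = (s - (i + 1)) + 1 from by omega, List.take_succ_cons]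
      simp only [emitFrom]
      rw [h1]
      simp

-- main invariant: A's outer loop from index i produces exactly B's assembly of the table from i
theorem main_eq (lines : List String) (i : Nat) :
    aLoop none (lines.drop i) = emitFrom lines (bSegs lines i) i := by
  by_cases h : i < lines.length
  · have hdrop : lines.drop i = lines[i] :: lines.drop (i + 1) :=
      (List.getElem_cons_drop h).symm
    rw [bSegs, dif_pos h]
    by_cases hb : PySem.Str.strip lines[i] = "block:"
    · rw [if_pos hb]
      have hk := bAdvance_ge lines (bInd lines[i]) (i + 1)
      have ih := main_eq lines (bAdvance lines (bInd lines[i]) (i + 1))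
      have hinner := inner_eq lines (bInd lines[i]) (i + 1)
      conv_lhs => rw [hdrop, aLoop]
      rw [if_pos hb]
      rw [show pvIndentOf lines[i] = bInd lines[i] from rfl]
      rw [hinner, ih]
      simp only [emitFrom]
      have hsl1 : PySem.List.slice lines (some (i : Int)) (some ((i + 1 : Nat) : Int)) = [lines[i]] := by
        rw [PySem.List.slice_natCast, show (i + 1) - i = 1 from by omega, hdrop,
          List.take_succ_cons, List.take_zero]
      have hsl2 : PySem.List.slice lines (some ((i + 1 : Nat) : Int))
            (some ((bAdvance lines (bInd lines[i]) (i + 1) : Nat) : Int))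
          = (lines.drop (i + 1)).take (bAdvance lines (bInd lines[i]) (i + 1) - (i + 1)) := by
        rw [PySem.List.slice_natCast]
      rw [hsl1, hsl2]
      simp
    · rw [if_neg hb]
      have ih := main_eq lines (i + 1)
      conv_lhs => rw [hdrop, aLoop]
      rw [if_neg hb, ih]
      exact (emitFrom_skip lines (bSegs lines (i + 1)) i h
        (fun s e bi rest hh => by have := bSegs_start lines (i + 1) s e bi rest hh; omega)).symm
  · have hnil : lines.drop i = [] := List.drop_eq_nil_of_le (by omega)
    rw [bSegs, dif_neg h]
    simp [emitFrom, hnil, aLoop]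
  termination_by lines.length - i
  decreasing_by
  · have := bAdvance_ge lines (bInd lines[i]) (i + 1); omega
  · omega

-- ===== VERDICT =====
theorem fix_block_children_indentation_spec : Claim_equal_fix_block_children_indentation := by
  intro lines _
  unfold Spec_fix_block_children_indentation fix_block_children_indentation fix_block_children_indentation_alt
  show aLoop none lines
      = ((bSegs lines 0).foldl (bEmitStep lines) ([], 0)).1
        ++ PySem.List.slice lines (some ((((bSegs lines 0).foldl (bEmitStep lines) ([], 0)).2 : Nat) : Int)) none
  rw [PySem.List.slice_from_natCast]
  rw [emit_foldl lines (bSegs lines 0) [] 0, List.nil_append, ← main_eq]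
  simp
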